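-- pv_equiv track=rewrite | github.com/gholibqasobov/CodeWars | CodeWars/sum of nums, sum of the sums and sum the nums up to that sum.py | sum_of_sums
-- ===== SOURCE A (Python) =====
-- def sum_of_sums(n):
--
--     def partial_sum(n):
--         s = 0
--         for i in range(1, n + 1):
--             s += i
--         return s
--
--     total = 0
--     for i in range(1, n + 1):
--         total += partial_sum(i)
--
--     def total_sum(totl):
--         t = 0
--         for i in range(1, totl + 1):
--             t += i
--
--         return t
--
--     return total_sum(total)
-- ===== SOURCE B (Python) =====
-- def sum_of_sums(n):
--     m = n if n > 0 else 0
--     total = m * (m + 1) * (m + 2) // 6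
--     return total * (total + 1) // 2
-- ===== Notes on version B (the rewrite author's own statement) =====
-- stated objective: faster
-- what changed: replaced the three accumulation loops by the closed-form tetrahedral number n(n+1)(n+2)/6 followed by the triangular number t(t+1)/2
import Mathlib
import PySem

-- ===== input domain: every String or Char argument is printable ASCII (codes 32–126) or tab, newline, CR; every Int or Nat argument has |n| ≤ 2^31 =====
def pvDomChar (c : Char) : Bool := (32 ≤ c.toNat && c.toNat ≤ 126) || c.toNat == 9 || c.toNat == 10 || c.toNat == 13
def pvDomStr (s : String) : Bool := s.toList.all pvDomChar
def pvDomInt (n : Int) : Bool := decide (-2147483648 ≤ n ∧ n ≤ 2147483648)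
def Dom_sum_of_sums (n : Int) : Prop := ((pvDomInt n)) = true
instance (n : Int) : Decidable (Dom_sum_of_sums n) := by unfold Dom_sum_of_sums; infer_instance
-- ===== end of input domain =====

-- B replaces A's three accumulation loops by the closed forms n(n+1)(n+2)/6 and t(t+1)/2 (objective: faster).

-- ===== PORT A =====
def pvPartialSum (n : Int) : Int :=
  (PySem.List.pyRange 1 (n + 1) 1).foldl (fun s i => s + i) 0

def pvTotalSum (totl : Int) : Int :=
  (PySem.List.pyRange 1 (totl + 1) 1).foldl (fun t i => t + i) 0

def sum_of_sums (n : Int) : Int :=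
  let total := (PySem.List.pyRange 1 (n + 1) 1).foldl (fun total i => total + pvPartialSum i) 0
  pvTotalSum total

-- ===== PORT B =====
def sum_of_sums_alt (n : Int) : Int :=
  let m := if n > 0 then n else 0
  let total := PySem.Int.floordiv (m * (m + 1) * (m + 2)) 6
  PySem.Int.floordiv (total * (total + 1)) 2

-- ===== PRECONDITION & SPEC =====
def Spec_sum_of_sums (n : Int) (out : Int) : Prop := out = sum_of_sums_alt n
instance (n : Int) (out : Int) : Decidable (Spec_sum_of_sums n out) := by unfold Spec_sum_of_sums; infer_instance

-- ===== CLAIM (what is proved, stated in full; the proofs are below) =====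
def Claim_equal_sum_of_sums : Prop := ∀ (n : Int), Dom_sum_of_sums n → Spec_sum_of_sums n (sum_of_sums n)

-- ===== LEMMAS AND PROOFS =====

theorem pvPartialSum_nonpos (n : Int) (h : n ≤ 0) : pvPartialSum n = 0 := by
  unfold pvPartialSum
  rw [PySem.List.pyRange_one_eq_nil (by omega)]
  rfl

theorem pvPartialSum_gauss : ∀ (m : Nat), 2 * pvPartialSum (m : Int) = (m : Int) * ((m : Int) + 1) := by
  intro m
  induction m with
  | zero => simp [pvPartialSum_nonpos 0 le_rfl]
  | succ k ih =>
    unfold pvPartialSum at *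
    have hsplit : PySem.List.pyRange 1 ((((k : Int) + 1) + 1)) 1
        = PySem.List.pyRange 1 ((k : Int) + 1) 1 ++ [(k : Int) + 1] :=
      PySem.List.pyRange_one_succ_right (by omega)
    push_cast
    rw [hsplit, List.foldl_append]
    simp only [List.foldl]
    ring_nf
    ring_nf at ih
    omega

-- the outer accumulation: 6 × total = m(m+1)(m+2)
theorem pvTotal_closed : ∀ (m : Nat),
    6 * ((PySem.List.pyRange 1 ((m : Int) + 1) 1).foldl (fun total i => total + pvPartialSum i) 0)
      = (m : Int) * ((m : Int) + 1) * ((m : Int) + 2) := by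
  intro m
  induction m with
  | zero => rw [PySem.List.pyRange_one_eq_nil (by omega)]; rfl
  | succ k ih =>
    have hsplit : PySem.List.pyRange 1 ((((k : Int) + 1) + 1)) 1
        = PySem.List.pyRange 1 ((k : Int) + 1) 1 ++ [(k : Int) + 1] :=
      PySem.List.pyRange_one_succ_right (by omega)
    push_cast
    rw [hsplit, List.foldl_append]
    simp only [List.foldl]
    have hg := pvPartialSum_gauss (k + 1)
    push_cast at hg
    nlinarith [hg, ih]

theorem pvTotal_nonneg (m : Nat) :
    0 ≤ (PySem.List.pyRange 1 ((m : Int) + 1) 1).foldl (fun total i => total + pvPartialSum i) 0 := by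
  have h0 : (0:Int) ≤ (m:Int) := Int.natCast_nonneg m
  have hp : (0:Int) ≤ (m:Int) * ((m:Int) + 1) * ((m:Int) + 2) := by positivity
  linarith [pvTotal_closed m]

theorem pvTotalSum_eq_partial (t : Int) : pvTotalSum t = pvPartialSum t := rfl

theorem pvTotalSum_floordiv (t : Int) (h : 0 ≤ t) :
    pvTotalSum t = PySem.Int.floordiv (t * (t + 1)) 2 := by
  obtain ⟨k, rfl⟩ := Int.eq_ofNat_of_zero_le h
  rw [pvTotalSum_eq_partial]
  have hg := pvPartialSum_gauss k
  rw [← hg]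
  simp [PySem.Int.floordiv, Int.mul_fdiv_cancel_left _ (by norm_num : (2:Int) ≠ 0)]

-- ===== VERDICT (by name: the statement is the Claim_ definition above) =====
theorem sum_of_sums_spec : Claim_equal_sum_of_sums := by
  intro n _
  unfold Spec_sum_of_sums sum_of_sums sum_of_sums_alt
  by_cases hn : n > 0
  · simp only [if_pos hn]
    obtain ⟨m, rfl⟩ := Int.eq_ofNat_of_zero_le (le_of_lt hn)
    have hc := pvTotal_closed m
    have hnn := pvTotal_nonneg m
    set T := (PySem.List.pyRange 1 ((m : Int) + 1) 1).foldl (fun total i => total + pvPartialSum i) 0 with hT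
    have h6 : PySem.Int.floordiv ((m : Int) * ((m : Int) + 1) * ((m : Int) + 2)) 6 = T := by
      rw [← hc]
      simp [PySem.Int.floordiv, Int.mul_fdiv_cancel_left _ (by norm_num : (6:Int) ≠ 0)]
    rw [h6]
    exact pvTotalSum_floordiv T hnn
  · simp only [if_neg hn]
    rw [PySem.List.pyRange_one_eq_nil (by omega)]
    norm_num [pvTotalSum, PySem.Int.floordiv]
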